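-- pv_equiv track=rewrite | github.com/Vladikuzasnij/Latvian-University | 1. Kurss 2. semestris Programmešana un datori II/1MPR03/5uzd_MPR03.py | oranzs
-- ===== SOURCE A (Python) =====
-- def zila(N, krasa):
--     # Skaita cik ir zīlas krāsas pērlītes N rindā
--     # N - N rindā
--     # krasa - "z" - zīla, "s" - sarkana, "o" - oranža
--     if N == 1:
--         if krasa == "z":
--             return 1
--         else:
--             return 0
--     else:
--         return 2 * sarkana((N - 1), krasa) + zila((N - 1), krasa) + 3 * oranzs((N - 1), krasa)
--
-- def sarkana(N, krasa):
--     # Skaita cik ir sarkanas krāsas pērlītes N rindā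
--     # N - N rindā
--     # krasa - "z" - zīla, "s" - sarkana, "o" - oranža
--     if N == 1:
--         if krasa == "s":
--             return 1
--         else:
--             return 0
--     else:
--         return 3 * sarkana((N - 1), krasa) + 2 * zila((N - 1), krasa) + 2 * oranzs((N - 1), krasa)
--
-- def oranzs(N, krasa):
--     # Skaita cik ir oranžas krāsas pērlītes N rindā
--     # N - N rindā
--     # krasa - "z" - zīla, "s" - sarkana, "o" - oranža
--     if N == 1:
--         if krasa == "o":
--             return 1
--         else:
--             return 0
--
--     else:
--         return sarkana((N - 1), krasa) + 3 * zila((N - 1), krasa) + oranzs((N - 1), krasa)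
-- ===== SOURCE B (Python) =====
-- def oranzs(N, krasa):
--     # Row-by-row DP on the (zila, sarkana, oranzs) counts of the recurrence.
--     z = 1 if krasa == "z" else 0
--     s = 1 if krasa == "s" else 0
--     o = 1 if krasa == "o" else 0
--     for _ in range(N - 1):
--         z, s, o = 2 * s + z + 3 * o, 3 * s + 2 * z + 2 * o, s + 3 * z + o
--     return o
-- ===== Notes on version B (the rewrite author's own statement) =====
-- stated objective: alternative
-- what changed: Replaced the triple mutual recursion (which recomputes the same rows exponentially often) by a single forward loop carrying the three per-row counts (z, s, o) and applying the recurrence once per row.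
import Mathlib
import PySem

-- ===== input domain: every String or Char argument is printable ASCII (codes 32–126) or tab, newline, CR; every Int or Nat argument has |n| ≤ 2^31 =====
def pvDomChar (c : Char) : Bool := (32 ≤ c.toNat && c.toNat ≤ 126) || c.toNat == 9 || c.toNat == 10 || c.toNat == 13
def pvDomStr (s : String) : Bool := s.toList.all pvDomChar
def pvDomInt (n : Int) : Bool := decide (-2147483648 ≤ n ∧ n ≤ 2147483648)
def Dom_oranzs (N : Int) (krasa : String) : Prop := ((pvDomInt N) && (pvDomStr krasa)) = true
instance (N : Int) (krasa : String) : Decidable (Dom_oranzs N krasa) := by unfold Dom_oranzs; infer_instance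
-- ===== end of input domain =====

-- B replaces A's triple mutual recursion with one forward loop carrying the three per-row counts
-- (objective: alternative, a dynamic-programming pass instead of branching recursion).

-- ===== PORT A =====
-- A is three mutually recursive functions on N; ported with a fuel parameter N.toNat
-- (under Pre_oranzs, 1 ≤ N, the fuel never runs out; the fuel-0 branch is unreachable).
mutual
def zilaF : Nat → Int → String → Int
  | 0, _, _ => 0
  | f+1, N, krasa =>
    if N = 1 then (if krasa == "z" then 1 else 0)
    else 2 * sarkanaF f (N - 1) krasa + zilaF f (N - 1) krasa + 3 * oranzsF f (N - 1) krasa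
def sarkanaF : Nat → Int → String → Int
  | 0, _, _ => 0
  | f+1, N, krasa =>
    if N = 1 then (if krasa == "s" then 1 else 0)
    else 3 * sarkanaF f (N - 1) krasa + 2 * zilaF f (N - 1) krasa + 2 * oranzsF f (N - 1) krasa
def oranzsF : Nat → Int → String → Int
  | 0, _, _ => 0
  | f+1, N, krasa =>
    if N = 1 then (if krasa == "o" then 1 else 0)
    else sarkanaF f (N - 1) krasa + 3 * zilaF f (N - 1) krasa + oranzsF f (N - 1) krasa
end

def oranzs (N : Int) (krasa : String) : Int := oranzsF N.toNat N krasa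

-- ===== PORT B =====
-- one step of the recurrence on the state (z, s, o)
def oranzsStep : Int × Int × Int → Int × Int × Int
  | (z, s, o) => (2 * s + z + 3 * o, 3 * s + 2 * z + 2 * o, s + 3 * z + o)

def oranzs_alt (N : Int) (krasa : String) : Int :=
  let z : Int := if krasa == "z" then 1 else 0
  let s : Int := if krasa == "s" then 1 else 0
  let o : Int := if krasa == "o" then 1 else 0
  -- for _ in range(N-1): apply the step (N-1).toNat times
  (oranzsStep^[(N - 1).toNat] (z, s, o)).2.2

-- ===== PRECONDITION & SPEC =====
-- Pre_: for N ≤ 0 the Python A recurses without a base case and raises RecursionError.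
def Pre_oranzs (N : Int) (krasa : String) : Prop := 1 ≤ N
instance (N : Int) (krasa : String) : Decidable (Pre_oranzs N krasa) := by unfold Pre_oranzs; infer_instance
def pvWitness_oranzs : Int × String := (4, "o")

def Spec_oranzs (N : Int) (krasa : String) (out : Int) : Prop := out = oranzs_alt N krasa
instance (N : Int) (krasa : String) (out : Int) : Decidable (Spec_oranzs N krasa out) := by unfold Spec_oranzs; infer_instance

-- ===== CLAIM (what is proved, stated in full; the proofs are below) =====
def Claim_equal_oranzs : Prop := ∀ (N : Int) (krasa : String), Dom_oranzs N krasa → Pre_oranzs N krasa → Spec_oranzs N krasa (oranzs N krasa)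
-- ===== LEMMAS AND PROOFS =====

-- With fuel n+1 and row number n+1, the three A-side functions compute exactly the three
-- components of B's state after n steps.
theorem oranzsF_iterate (krasa : String) : ∀ (n : Nat),
    zilaF (n+1) (n+1 : Nat) krasa =
      (oranzsStep^[n] ((if krasa == "z" then 1 else 0), (if krasa == "s" then 1 else 0), (if krasa == "o" then 1 else 0))).1 ∧
    sarkanaF (n+1) (n+1 : Nat) krasa =
      (oranzsStep^[n] ((if krasa == "z" then 1 else 0), (if krasa == "s" then 1 else 0), (if krasa == "o" then 1 else 0))).2.1 ∧
    oranzsF (n+1) (n+1 : Nat) krasa =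
      (oranzsStep^[n] ((if krasa == "z" then 1 else 0), (if krasa == "s" then 1 else 0), (if krasa == "o" then 1 else 0))).2.2 := by
  intro n
  induction n with
  | zero => simp [zilaF, sarkanaF, oranzsF]
  | succ n ih =>
    obtain ⟨hz, hs, ho⟩ := ih
    have hne : ((n:Int) + 1 + 1) ≠ 1 := by omega
    have hsub : ((n:Int) + 1 + 1) - 1 = ((n:Int) + 1) := by omega
    have push : ((n + 1 + 1 : Nat) : Int) = (n:Int) + 1 + 1 := by push_cast; ring
    have cast1 : ((n:Int) + 1) = ((n + 1 : Nat) : Int) := by push_cast; ring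
    rw [Function.iterate_succ_apply']
    refine ⟨?_, ?_, ?_⟩
    · rw [show zilaF (n+1+1) ((n+1+1 : Nat) : Int) krasa =
            2 * sarkanaF (n+1) ((n+1 : Nat) : Int) krasa + zilaF (n+1) ((n+1 : Nat) : Int) krasa
              + 3 * oranzsF (n+1) ((n+1 : Nat) : Int) krasa by
          rw [zilaF, push, if_neg hne, hsub, cast1]]
      rw [hz, hs, ho]; simp [oranzsStep]
    · rw [show sarkanaF (n+1+1) ((n+1+1 : Nat) : Int) krasa =
            3 * sarkanaF (n+1) ((n+1 : Nat) : Int) krasa + 2 * zilaF (n+1) ((n+1 : Nat) : Int) krasa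
              + 2 * oranzsF (n+1) ((n+1 : Nat) : Int) krasa by
          rw [sarkanaF, push, if_neg hne, hsub, cast1]]
      rw [hz, hs, ho]; simp [oranzsStep]
    · rw [show oranzsF (n+1+1) ((n+1+1 : Nat) : Int) krasa =
            sarkanaF (n+1) ((n+1 : Nat) : Int) krasa + 3 * zilaF (n+1) ((n+1 : Nat) : Int) krasa
              + oranzsF (n+1) ((n+1 : Nat) : Int) krasa by
          rw [oranzsF, push, if_neg hne, hsub, cast1]]
      rw [hz, hs, ho]; simp [oranzsStep]

theorem oranzs_spec : Claim_equal_oranzs := by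
  intro N krasa _ hPre
  have hN : N = ((N.toNat - 1 : Nat) + 1 : Nat) := by
    have : 1 ≤ N := hPre
    omega
  unfold Spec_oranzs oranzs oranzs_alt
  rw [hN]
  have := (oranzsF_iterate krasa (N.toNat - 1)).2.2
  have hfuel : (((N.toNat - 1 : Nat) + 1 : Nat) : Int).toNat = (N.toNat - 1) + 1 := by omega
  have hsub : ((((N.toNat - 1 : Nat) + 1 : Nat) : Int) - 1).toNat = N.toNat - 1 := by
    push_cast; omega
  rw [hfuel, hsub]
  exact this
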